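-- pv_equiv track=rewrite | github.com/trueaseYUKI/python-practies | python_practies/滑动窗口/定长滑动窗口/3679. 使库存平衡的最少丢弃次数.py | minArrivalsToDiscard
-- ===== SOURCE A (Python) =====
-- from collections import defaultdict
-- from typing import List
--
-- def minArrivalsToDiscard(arrivals: List[int], w: int, m: int) -> int:
--
--     # w 是窗口大小，m 是窗口中允许重复的次数
--     cnt = defaultdict(int)
--
--     # left 、right 表示天数范围
--     left = 0
--     right = 0
--     ans = 0
--     del_list = [False] * len(arrivals)
--
--
--     # 先求第一个窗口
--     for i in range(0,w):
--         if cnt[arrivals[i]] < m: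
--             cnt[arrivals[i]] += 1
--         # 当第一个窗口发现重复的次数大于我们的
--         # 将丢弃个数 +1 ，并且将我们丢弃的最大天数记录下来
--         else:
--             del_list[i] = True
--             ans += 1
--         right += 1
--
--
--
--     while right < len(arrivals):
--
--         # 当天数大于窗口的最大范围
--         if right - left + 1 > w:
--             if cnt[arrivals[left]] > 0 and not del_list[left]:
--                 cnt[arrivals[left]] -= 1
--             left += 1
--
--         if right - left + 1 <= w and cnt[arrivals[right]] < m:
--             cnt[arrivals[right]] += 1
--         elif cnt[arrivals[right]] >= m:
--             ans += 1
--             del_list[right] = True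
--         right += 1
--
--
--     return ans
-- ===== SOURCE B (Python) =====
-- def minArrivalsToDiscard(arrivals, w, m):
--     # Group the arrival indices by value, then decide keeps/discards independently
--     # per value: the greedy only ever compares an arrival with earlier kept
--     # arrivals of the same value inside the window, so the values decouple.
--     pos = {}
--     for i, x in enumerate(arrivals):
--         pos[x] = pos.get(x, []) + [i]
--     ans = 0
--     for ps in pos.values():
--         kept = []  # kept indices of this value, oldest first
--         for p in ps:
--             while kept and kept[0] <= p - w:
--                 kept.pop(0)
--             if len(kept) < m:
--                 kept.append(p)
--             else:
--                 ans += 1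
--     return ans
-- ===== Notes on version B (the rewrite author's own statement) =====
-- stated objective: alternative
-- what changed: A runs one global sliding window over all indices (first-window loop + left/right pointer loop with a shared counter and discard-flag list); B first buckets the arrival indices by value into a dict and then runs an independent per-value greedy over each bucket with a small kept-positions list, exploiting that the greedy decisions of distinct values never interact.
import Mathlib
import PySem

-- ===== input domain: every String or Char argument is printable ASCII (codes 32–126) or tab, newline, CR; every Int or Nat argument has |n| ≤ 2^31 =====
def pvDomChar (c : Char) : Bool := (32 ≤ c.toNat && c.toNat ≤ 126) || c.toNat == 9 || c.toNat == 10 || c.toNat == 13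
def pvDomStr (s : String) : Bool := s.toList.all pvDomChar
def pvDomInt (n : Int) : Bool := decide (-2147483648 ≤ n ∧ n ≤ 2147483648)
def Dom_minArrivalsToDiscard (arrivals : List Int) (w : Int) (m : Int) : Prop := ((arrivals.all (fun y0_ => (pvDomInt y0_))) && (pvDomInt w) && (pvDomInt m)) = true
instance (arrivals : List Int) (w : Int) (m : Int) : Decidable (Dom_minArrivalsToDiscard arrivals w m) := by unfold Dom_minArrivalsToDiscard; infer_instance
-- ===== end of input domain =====

-- B replaces A's global sliding window (two pointer-driven loops over a shared counter and a
-- discard-flag list) by bucketing the arrival indices per value and running an independent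
-- greedy over each bucket; equal return value on A's whole domain w ≤ len(arrivals).
-- Python defaultdict(int) counters are modelled as total functions Int → Int (only values read).

-- counter updates cnt[x] += 1 / cnt[x] -= 1 (A-side helper)
def pvInc (cnt : Int → Int) (x : Int) : Int → Int := fun y => if y = x then cnt y + 1 else cnt y
def pvDec (cnt : Int → Int) (x : Int) : Int → Int := fun y => if y = x then cnt y - 1 else cnt y

-- ===== PORT A =====
-- the 'while right < len(arrivals)' loop; state (cnt, left, right, ans, del_list);
-- the extra Nat argument is only fuel making the recursion structural (it never cuts the loop short:
-- it is started at (n - right).toNat, the exact number of remaining iterations)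
def pvLoopA (arrivals : List Int) (w m n : Int)
    (cnt : Int → Int) (left right ans : Int) (del : List Bool) : Nat → Int
  | 0 => ans
  | fuel + 1 =>
    if right < n then
      let p : (Int → Int) × Int :=
        if right - left + 1 > w then
          (if cnt (PySem.List.pyGetD arrivals left 0) > 0 ∧ PySem.List.pyGetD del left false = false
             then pvDec cnt (PySem.List.pyGetD arrivals left 0) else cnt,
           left + 1)
        else (cnt, left)
      let cnt1 := p.1
      let left1 := p.2
      let x := PySem.List.pyGetD arrivals right 0
      if right - left1 + 1 ≤ w ∧ cnt1 x < m then
        pvLoopA arrivals w m n (pvInc cnt1 x) left1 (right + 1) ans del fuel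
      else if cnt1 x ≥ m then
        pvLoopA arrivals w m n cnt1 left1 (right + 1) (ans + 1) (PySem.List.pySetD del right true) fuel
      else
        pvLoopA arrivals w m n cnt1 left1 (right + 1) ans del fuel
    else ans

def minArrivalsToDiscard (arrivals : List Int) (w : Int) (m : Int) : Int :=
  let n : Int := arrivals.length
  -- first window: for i in range(0, w); state (cnt, right, ans, del_list)
  let s := (PySem.List.pyRange 0 w 1).foldl
    (fun (st : (Int → Int) × Int × Int × List Bool) i =>
      let cnt := st.1; let right := st.2.1; let ans := st.2.2.1; let del := st.2.2.2
      let x := PySem.List.pyGetD arrivals i 0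
      if cnt x < m then (pvInc cnt x, right + 1, ans, del)
      else (cnt, right + 1, ans + 1, PySem.List.pySetD del i true))
    (fun _ => 0, 0, 0, List.replicate arrivals.length false)
  pvLoopA arrivals w m n s.1 0 s.2.1 s.2.2.1 s.2.2.2 ((n - s.2.1).toNat)

-- ===== PORT B =====
-- the inner "while kept and kept[0] <= p - w: kept.pop(0)" loop
def pvEvictB (w p : Int) : List Int → List Int
  | [] => []
  | q :: rest => if q ≤ p - w then pvEvictB w p rest else q :: rest

def minArrivalsToDiscard_alt (arrivals : List Int) (w : Int) (m : Int) : Int :=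
  -- pos[x] = pos.get(x, []) + [i] over enumerate(arrivals)
  let pos : PySem.Dict Int (List Int) :=
    (PySem.List.enumerate arrivals).foldl
      (fun d p => d.modify p.2 [] (fun v => v ++ [p.1])) PySem.Dict.empty
  -- for ps in pos.values(): per-value greedy with a kept-positions list
  pos.values.foldl
    (fun ans ps =>
      (ps.foldl
        (fun (st : List Int × Int) p =>
          let kept := pvEvictB w p st.1
          if PySem.List.len kept < m then (kept ++ [p], st.2)
          else (kept, st.2 + 1))
        ([], ans)).2)
    0

-- ===== PRECONDITION & SPEC =====
-- Pre_ is exactly A's domain: for w > len(arrivals) the first-window loop of A raises IndexError;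
-- A returns normally on every other input (any w ≤ len, any m).
def Pre_minArrivalsToDiscard (arrivals : List Int) (w : Int) (m : Int) : Prop :=
  w ≤ (arrivals.length : Int)
instance (arrivals : List Int) (w : Int) (m : Int) : Decidable (Pre_minArrivalsToDiscard arrivals w m) := by unfold Pre_minArrivalsToDiscard; infer_instance
def pvWitness_minArrivalsToDiscard : List Int × Int × Int := ([1, 2, 1, 1, 2], 3, 1)

def Spec_minArrivalsToDiscard (arrivals : List Int) (w : Int) (m : Int) (out : Int) : Prop := out = minArrivalsToDiscard_alt arrivals w m
instance (arrivals : List Int) (w : Int) (m : Int) (out : Int) : Decidable (Spec_minArrivalsToDiscard arrivals w m out) := by unfold Spec_minArrivalsToDiscard; infer_instance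

-- ===== CLAIM (what is proved, stated in full; the proofs are below) =====
def Claim_equal_minArrivalsToDiscard : Prop := ∀ (arrivals : List Int) (w : Int) (m : Int), Dom_minArrivalsToDiscard arrivals w m → Pre_minArrivalsToDiscard arrivals w m → Spec_minArrivalsToDiscard arrivals w m (minArrivalsToDiscard arrivals w m)

-- ===== LEMMAS AND PROOFS =====

-- common reference recursion: one uniform step per index (Nat-indexed), state (cnt, del, ans)
def pvRefStep (a : List Int) (wn : Nat) (m : Int)
    (st : (Int → Int) × List Bool × Int) (i : Nat) : (Int → Int) × List Bool × Int :=
  let cnt := st.1; let del := st.2.1; let ans := st.2.2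
  let cnt1 := if wn ≤ i ∧ del.getD (i - wn) false = false
    then pvDec cnt (a.getD (i - wn) 0) else cnt
  let x := a.getD i 0
  if cnt1 x < m then (pvInc cnt1 x, del, ans) else (cnt1, del.set i true, ans + 1)

def pvRef (a : List Int) (wn : Nat) (m : Int) (r : Nat) : (Int → Int) × List Bool × Int :=
  (List.range r).foldl (pvRefStep a wn m) (fun _ => 0, List.replicate a.length false, 0)

-- the number of kept occurrences of x among window indices [r - wn, r)
def pvCnt (a : List Int) (del : List Bool) (wn r : Nat) (x : Int) : Int :=
  ((List.range' (r - wn) (min wn r)).countP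
    (fun j => a.getD j 0 == x && !(del.getD j false)) : Int)

def pvInv (a : List Int) (wn : Nat) (st : (Int → Int) × List Bool × Int) (r : Nat) : Prop :=
  st.2.1.length = a.length ∧
  (∀ j, r ≤ j → st.2.1.getD j false = false) ∧
  (∀ x, st.1 x = pvCnt a st.2.1 wn r x)

theorem pvRef_succ (a : List Int) (wn : Nat) (m : Int) (r : Nat) :
    pvRef a wn m (r + 1) = pvRefStep a wn m (pvRef a wn m r) r := by
  simp [pvRef, List.range_succ]

theorem pvGetD_set_ne (l : List Bool) (i j : Nat) (v d : Bool) (h : i ≠ j) :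
    (l.set i v).getD j d = l.getD j d := by
  simp [List.getD, List.getElem?_set_ne h]

theorem pvGetD_set_self (l : List Bool) (r : Nat) (v d : Bool) (h : r < l.length) :
    (l.set r v).getD r d = v := by
  simp [List.getD, h]

theorem pvGetD_replicate_false (n j : Nat) : (List.replicate n false).getD j false = false := by
  rcases Nat.lt_or_ge j n with h | h
  · simp [List.getD, h]
  · have hnone : (List.replicate n false)[j]? = none := by
      rw [List.getElem?_eq_none_iff]
      simpa using h
    simp [List.getD, hnone]

theorem pvRange'_eq_cons (s n : Nat) (h : 1 ≤ n) :
    List.range' s n = s :: List.range' (s + 1) (n - 1) := by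
  cases n with
  | zero => omega
  | succ n => simpa using List.range'_succ (s := s) (n := n) (step := 1)

-- after the (possible) eviction at step r, the counter counts kept elements over [r+1-wn, r)
theorem pvMid (a : List Int) (wn : Nat) (m : Int) (hw : 1 ≤ wn) (r : Nat)
    (hcnt : ∀ x, (pvRef a wn m r).1 x = pvCnt a (pvRef a wn m r).2.1 wn r x) (x : Int) :
    (if wn ≤ r ∧ (pvRef a wn m r).2.1.getD (r - wn) false = false
      then pvDec (pvRef a wn m r).1 (a.getD (r - wn) 0) else (pvRef a wn m r).1) x
    = ((List.range' (r + 1 - wn) (min (wn - 1) r)).countP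
        (fun j => a.getD j 0 == x && !((pvRef a wn m r).2.1.getD j false)) : Int) := by
  by_cases hge : wn ≤ r
  · have h1 : min wn r = wn := by omega
    have h2 : r + 1 - wn = r - wn + 1 := by omega
    have h3 : min (wn - 1) r = wn - 1 := by omega
    have h4 : List.range' (r - wn) wn = (r - wn) :: List.range' (r - wn + 1) (wn - 1) :=
      pvRange'_eq_cons _ _ hw
    by_cases hdel : (pvRef a wn m r).2.1.getD (r - wn) false = false
    · rw [if_pos ⟨hge, hdel⟩]
      simp only [pvDec, hcnt, pvCnt, h1, h2, h3, h4, List.countP_cons, hdel]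
      by_cases hx : a.getD (r - wn) 0 = x
      · have hx3 : a[r - wn]?.getD 0 = x := hx
        simp [hx3]
        try omega
      · have hx2 : ¬ x = a[r - wn]?.getD 0 := fun h => hx h.symm
        have hx3 : ¬ a[r - wn]?.getD 0 = x := hx
        simp [hx2, hx3]
    · rw [if_neg (fun h => hdel h.2)]
      rw [hcnt x]
      simp only [pvCnt, h1, h2, h3, h4, List.countP_cons]
      have hdel' : (pvRef a wn m r).2.1.getD (r - wn) false = true := by
        cases h : (pvRef a wn m r).2.1.getD (r - wn) false
        · exact absurd h hdel
        · rfl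
      have hdel2 : (pvRef a wn m r).2.1[r - wn]?.getD false = true := hdel'
      simp [hdel2]
  · have h1 : r - wn = 0 := by omega
    have h2 : r + 1 - wn = 0 := by omega
    have h3 : min wn r = r := by omega
    have h4 : min (wn - 1) r = r := by omega
    rw [if_neg (fun h => hge h.1)]
    rw [hcnt x]
    simp only [pvCnt, h1, h2, h3, h4]

theorem pvInv_holds (a : List Int) (wn : Nat) (m : Int) (hw : 1 ≤ wn) :
    ∀ r, r ≤ a.length → pvInv a wn (pvRef a wn m r) r := by
  intro r
  induction r with
  | zero =>
    intro _
    refine ⟨by simp [pvRef], ?_, ?_⟩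
    · intro j _
      simpa [pvRef] using pvGetD_replicate_false a.length j
    · intro x
      simp [pvRef, pvCnt]
  | succ r ih =>
    intro hr1
    have hrlt : r < a.length := hr1
    obtain ⟨hlen, hzero, hcnt⟩ := ih (Nat.le_of_lt hrlt)
    have hmid := pvMid a wn m hw r hcnt
    have h5 : min wn (r + 1) = min (wn - 1) r + 1 := by omega
    have h6 : (r + 1 - wn) + min (wn - 1) r = r := by omega
    have hsplit : List.range' (r + 1 - wn) (min wn (r + 1))
        = List.range' (r + 1 - wn) (min (wn - 1) r) ++ [r] := by
      rw [h5]
      have hc := List.range'_concat (s := r + 1 - wn) (n := min (wn - 1) r) (step := 1)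
      simpa [h6] using hc
    rw [pvRef_succ]
    simp only [pvRefStep]
    set cnt1 := (if wn ≤ r ∧ (pvRef a wn m r).2.1.getD (r - wn) false = false
      then pvDec (pvRef a wn m r).1 (a.getD (r - wn) 0) else (pvRef a wn m r).1) with hcnt1
    by_cases hbr : cnt1 (a.getD r 0) < m
    · rw [if_pos hbr]
      refine ⟨hlen, ?_, ?_⟩
      · intro j hj
        exact hzero j (by omega)
      · intro x
        simp only [pvCnt, hsplit, List.countP_append, List.countP_cons, List.countP_nil]
        have hdelr : (pvRef a wn m r).2.1.getD r false = false := hzero r (le_refl r)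
        simp only [pvInc, hmid x, hdelr]
        by_cases hx : x = a.getD r 0
        · simp [hx]
        · have hx2 : ¬ x = a[r]?.getD 0 := hx
          have hx3 : ¬ a[r]?.getD 0 = x := fun h => hx h.symm
          simp [hx2, hx3]
    · rw [if_neg hbr]
      refine ⟨by simpa using hlen, ?_, ?_⟩
      · intro j hj
        rw [pvGetD_set_ne _ _ _ _ _ (by omega : r ≠ j)]
        exact hzero j (by omega)
      · intro x
        simp only [pvCnt, hsplit, List.countP_append, List.countP_cons, List.countP_nil]
        have hdelr : ((pvRef a wn m r).2.1.set r true).getD r false = true :=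
          pvGetD_set_self _ _ _ _ (by omega)
        have hcong : (List.range' (r + 1 - wn) (min (wn - 1) r)).countP
            (fun j => a.getD j 0 == x && !(((pvRef a wn m r).2.1.set r true).getD j false))
            = (List.range' (r + 1 - wn) (min (wn - 1) r)).countP
            (fun j => a.getD j 0 == x && !((pvRef a wn m r).2.1.getD j false)) := by
          refine List.countP_congr ?_
          intro j hj
          have hjr : j < r := by
            have := List.mem_range'_1.1 hj
            omega
          rw [pvGetD_set_ne _ _ _ _ _ (by omega : r ≠ j)]
        rw [hcong, hdelr, hmid x]
        simp

-- A's first-window loop equals the reference fold over the first wn indices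
theorem pvPhase1_aux (a : List Int) (wn : Nat) (m : Int) (hw : 1 ≤ wn) (hn : wn ≤ a.length) :
    ∀ k, k ≤ wn →
    (List.range k).foldl
      (fun (st : (Int → Int) × Int × Int × List Bool) (j : Nat) =>
        let cnt := st.1; let right := st.2.1; let ans := st.2.2.1; let del := st.2.2.2
        let x := PySem.List.pyGetD a (j : Int) 0
        if cnt x < m then (pvInc cnt x, right + 1, ans, del)
        else (cnt, right + 1, ans + 1, PySem.List.pySetD del (j : Int) true))
      (fun _ => 0, 0, 0, List.replicate a.length false)
    = ((pvRef a wn m k).1, (k : Int), (pvRef a wn m k).2.2, (pvRef a wn m k).2.1) := by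
  intro k
  induction k with
  | zero =>
    intro _
    simp [pvRef]
  | succ k ih =>
    intro hk
    rw [List.range_succ, List.foldl_append, ih (by omega), List.foldl_cons, List.foldl_nil]
    simp only [PySem.List.pyGetD_natCast, PySem.List.pySetD_natCast]
    rw [pvRef_succ]
    simp only [pvRefStep]
    have hev : (if wn ≤ k ∧ (pvRef a wn m k).2.1.getD (k - wn) false = false
        then pvDec (pvRef a wn m k).1 (a.getD (k - wn) 0) else (pvRef a wn m k).1)
        = (pvRef a wn m k).1 := if_neg (fun h => absurd h.1 (by omega))
    rw [hev]
    by_cases hbr : (pvRef a wn m k).1 (a.getD k 0) < m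
    · rw [if_pos hbr, if_pos hbr]
      simp
    · rw [if_neg hbr, if_neg hbr]
      simp

theorem pvPhase1 (a : List Int) (wn : Nat) (m : Int) (hw : 1 ≤ wn) (hn : wn ≤ a.length) :
    (PySem.List.pyRange 0 (wn : Int) 1).foldl
      (fun (st : (Int → Int) × Int × Int × List Bool) i =>
        let cnt := st.1; let right := st.2.1; let ans := st.2.2.1; let del := st.2.2.2
        let x := PySem.List.pyGetD a i 0
        if cnt x < m then (pvInc cnt x, right + 1, ans, del)
        else (cnt, right + 1, ans + 1, PySem.List.pySetD del i true))
      (fun _ => 0, 0, 0, List.replicate a.length false)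
    = ((pvRef a wn m wn).1, (wn : Int), (pvRef a wn m wn).2.2, (pvRef a wn m wn).2.1) := by
  rw [PySem.List.pyRange_zero_natCast, List.foldl_map]
  exact pvPhase1_aux a wn m hw hn wn le_rfl

-- the while loop, started at right = r in lockstep with the reference fold, ends at its answer
theorem pvPhase2 (a : List Int) (wn : Nat) (m : Int) (hw : 1 ≤ wn)
    (k : Nat) : ∀ r, wn ≤ r → r + k = a.length →
    pvLoopA a (wn : Int) m (a.length : Int)
      (pvRef a wn m r).1 ((r : Int) - (wn : Int)) (r : Int) (pvRef a wn m r).2.2 (pvRef a wn m r).2.1 k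
    = (pvRef a wn m a.length).2.2 := by
  induction k with
  | zero =>
    intro r hge hl
    have hr : r = a.length := by omega
    subst hr
    simp [pvLoopA]
  | succ k ih =>
    intro r hge hl
    have hrlt : r < a.length := by omega
    obtain ⟨hlen, hzero, hcnt⟩ := pvInv_holds a wn m hw r (Nat.le_of_lt hrlt)
    have hpos : (pvRef a wn m r).2.1.getD (r - wn) false = false →
        0 < (pvRef a wn m r).1 (a.getD (r - wn) 0) := by
      intro hd
      rw [hcnt]
      simp only [pvCnt, show min wn r = wn from by omega, pvRange'_eq_cons _ _ hw,
        List.countP_cons]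
      have hd' : (pvRef a wn m r).2.1[r - wn]?.getD false = false := hd
      simp [hd']
    simp only [pvLoopA]
    rw [if_pos (by omega : (r : Int) < (a.length : Int))]
    rw [if_pos (show (r : Int) - ((r : Int) - (wn : Int)) + 1 > (wn : Int) from by omega)]
    rw [show (r : Int) - (wn : Int) = ((r - wn : Nat) : Int) from by omega]
    simp only [PySem.List.pyGetD_natCast, PySem.List.pySetD_natCast]
    have hca : ((r + 1 : Nat) : Int) = (r : Int) + 1 := by push_cast; ring
    have hcb : ((r + 1 : Nat) : Int) - (wn : Int) = ((r - wn : Nat) : Int) + 1 := by omega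
    have hcc : (r : Int) + 1 - (wn : Int) = ((r - wn : Nat) : Int) + 1 := by omega
    by_cases hd : (pvRef a wn m r).2.1.getD (r - wn) false = false
    · have hevict : (if (pvRef a wn m r).1 (a.getD (r - wn) 0) > 0 ∧
            (pvRef a wn m r).2.1.getD (r - wn) false = false
          then pvDec (pvRef a wn m r).1 (a.getD (r - wn) 0) else (pvRef a wn m r).1)
          = pvDec (pvRef a wn m r).1 (a.getD (r - wn) 0) := if_pos ⟨hpos hd, hd⟩
      have hev2 : (if wn ≤ r ∧ (pvRef a wn m r).2.1.getD (r - wn) false = false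
          then pvDec (pvRef a wn m r).1 (a.getD (r - wn) 0) else (pvRef a wn m r).1)
          = pvDec (pvRef a wn m r).1 (a.getD (r - wn) 0) := if_pos ⟨hge, hd⟩
      rw [hevict]
      by_cases hbr : pvDec (pvRef a wn m r).1 (a.getD (r - wn) 0) (a.getD r 0) < m
      · rw [if_pos ⟨by omega, hbr⟩]
        have hstep : pvRef a wn m (r + 1)
            = (pvInc (pvDec (pvRef a wn m r).1 (a.getD (r - wn) 0)) (a.getD r 0),
               (pvRef a wn m r).2.1, (pvRef a wn m r).2.2) := by
          rw [pvRef_succ]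
          simp only [pvRefStep]
          rw [hev2, if_pos hbr]
        have h2 := ih (r + 1) (by omega) (by omega)
        rw [hstep] at h2
        simpa [hca, hcb, hcc] using h2
      · rw [if_neg (fun h => hbr h.2),
            if_pos (show pvDec (pvRef a wn m r).1 (a.getD (r - wn) 0) (a.getD r 0) ≥ m from by omega)]
        have hstep : pvRef a wn m (r + 1)
            = (pvDec (pvRef a wn m r).1 (a.getD (r - wn) 0),
               (pvRef a wn m r).2.1.set r true, (pvRef a wn m r).2.2 + 1) := by
          rw [pvRef_succ]
          simp only [pvRefStep]
          rw [hev2, if_neg hbr]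
        have h2 := ih (r + 1) (by omega) (by omega)
        rw [hstep] at h2
        simpa [hca, hcb, hcc] using h2
    · have hevict : (if (pvRef a wn m r).1 (a.getD (r - wn) 0) > 0 ∧
            (pvRef a wn m r).2.1.getD (r - wn) false = false
          then pvDec (pvRef a wn m r).1 (a.getD (r - wn) 0) else (pvRef a wn m r).1)
          = (pvRef a wn m r).1 := if_neg (fun h => hd h.2)
      have hev2 : (if wn ≤ r ∧ (pvRef a wn m r).2.1.getD (r - wn) false = false
          then pvDec (pvRef a wn m r).1 (a.getD (r - wn) 0) else (pvRef a wn m r).1)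
          = (pvRef a wn m r).1 := if_neg (fun h => hd h.2)
      rw [hevict]
      by_cases hbr : (pvRef a wn m r).1 (a.getD r 0) < m
      · rw [if_pos ⟨by omega, hbr⟩]
        have hstep : pvRef a wn m (r + 1)
            = (pvInc (pvRef a wn m r).1 (a.getD r 0),
               (pvRef a wn m r).2.1, (pvRef a wn m r).2.2) := by
          rw [pvRef_succ]
          simp only [pvRefStep]
          rw [hev2, if_pos hbr]
        have h2 := ih (r + 1) (by omega) (by omega)
        rw [hstep] at h2
        simpa [hca, hcb, hcc] using h2
      · rw [if_neg (fun h => hbr h.2),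
            if_pos (show (pvRef a wn m r).1 (a.getD r 0) ≥ m from by omega)]
        have hstep : pvRef a wn m (r + 1)
            = ((pvRef a wn m r).1,
               (pvRef a wn m r).2.1.set r true, (pvRef a wn m r).2.2 + 1) := by
          rw [pvRef_succ]
          simp only [pvRefStep]
          rw [hev2, if_neg hbr]
        have h2 := ih (r + 1) (by omega) (by omega)
        rw [hstep] at h2
        simpa [hca, hcb, hcc] using h2

-- ===== B-side: final discard flags, per-value decomposition =====

-- the final discard flag of index j
def pvDelF (a : List Int) (wn : Nat) (m : Int) (j : Nat) : Bool :=
  (pvRef a wn m a.length).2.1.getD j false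

-- flags already set are stable
theorem pvDel_stable (a : List Int) (wn : Nat) (m : Int) :
    ∀ (s r j : Nat), j < r → r ≤ s →
    (pvRef a wn m s).2.1.getD j false = (pvRef a wn m r).2.1.getD j false := by
  intro s
  induction s with
  | zero => intro r j _ h2; interval_cases r; rfl
  | succ s ih =>
    intro r j h1 h2
    rcases Nat.lt_or_ge r (s + 1) with h | h
    · have hr : r ≤ s := by omega
      rw [← ih r j h1 hr]
      rw [pvRef_succ]
      simp only [pvRefStep]
      have hne : s ≠ j := by omega
      split
      · split
        · rfl
        · exact pvGetD_set_ne _ _ _ _ _ hne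
      · split
        · rfl
        · exact pvGetD_set_ne _ _ _ _ _ hne
    · have : r = s + 1 := by omega
      subst this; rfl

-- the final count of kept same-value occurrences in the window before index r
def pvCntF (a : List Int) (wn : Nat) (m : Int) (r : Nat) : Int :=
  ((List.range' (r + 1 - wn) (min (wn - 1) r)).countP
    (fun j => a.getD j 0 == a.getD r 0 && !(pvDelF a wn m j)) : Int)

-- the per-step counter value, expressed through final flags
theorem pvCnt1_final (a : List Int) (wn : Nat) (m : Int) (hw : 1 ≤ wn) (r : Nat)
    (hr : r ≤ a.length) :
    (if wn ≤ r ∧ (pvRef a wn m r).2.1.getD (r - wn) false = false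
      then pvDec (pvRef a wn m r).1 (a.getD (r - wn) 0) else (pvRef a wn m r).1) (a.getD r 0)
    = pvCntF a wn m r := by
  obtain ⟨_, _, hcnt⟩ := pvInv_holds a wn m hw r hr
  rw [pvMid a wn m hw r hcnt (a.getD r 0)]
  unfold pvCntF
  congr 1
  refine List.countP_congr ?_
  intro j hj
  have hjr : j < r := by
    have := List.mem_range'_1.1 hj
    omega
  rw [show (pvRef a wn m r).2.1.getD j false = pvDelF a wn m j from
    (pvDel_stable a wn m a.length r j hjr hr).symm]

-- characterization of the final flag at r
theorem pvDelChar (a : List Int) (wn : Nat) (m : Int) (hw : 1 ≤ wn) (r : Nat)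
    (hr : r < a.length) :
    pvDelF a wn m r = !decide (pvCntF a wn m r < m) := by
  obtain ⟨hlen, hzero, _⟩ := pvInv_holds a wn m hw r (Nat.le_of_lt hr)
  have hstep := pvRef_succ a wn m r
  have hstab : pvDelF a wn m r = (pvRef a wn m (r + 1)).2.1.getD r false :=
    pvDel_stable a wn m a.length (r + 1) r (by omega) (by omega)
  rw [hstab, hstep]
  simp only [pvRefStep]
  rw [show (if wn ≤ r ∧ (pvRef a wn m r).2.1.getD (r - wn) false = false
      then pvDec (pvRef a wn m r).1 (a.getD (r - wn) 0) else (pvRef a wn m r).1) (a.getD r 0)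
      = pvCntF a wn m r from by
    have := pvCnt1_final a wn m hw r (Nat.le_of_lt hr)
    simpa using this]
  by_cases hbr : pvCntF a wn m r < m
  · rw [if_pos hbr]
    have h : (pvRef a wn m r).2.1[r]?.getD false = false := hzero r le_rfl
    simp [h, hbr]
  · rw [if_neg hbr]
    rw [pvGetD_set_self _ _ _ _ (by omega)]
    simp [hbr]

-- the reference answer counts the final flags
theorem pvAnsChar (a : List Int) (wn : Nat) (m : Int) (hw : 1 ≤ wn) :
    ∀ r, r ≤ a.length →
    (pvRef a wn m r).2.2 = ((List.range r).countP (fun j => pvDelF a wn m j) : Int) := by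
  intro r
  induction r with
  | zero => intro _; simp [pvRef]
  | succ r ih =>
    intro hr1
    have hrlt : r < a.length := hr1
    obtain ⟨hlen, hzero, _⟩ := pvInv_holds a wn m hw r (Nat.le_of_lt hrlt)
    have hstab : pvDelF a wn m r = (pvRef a wn m (r + 1)).2.1.getD r false :=
      pvDel_stable a wn m a.length (r + 1) r (by omega) (by omega)
    have hcount : (List.range (r + 1)).countP (fun j => pvDelF a wn m j)
        = (List.range r).countP (fun j => pvDelF a wn m j)
          + (if pvDelF a wn m r then 1 else 0) := by
      rw [List.range_succ, List.countP_append]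
      simp [List.countP_cons]
    rw [pvRef_succ] at hstab ⊢
    simp only [pvRefStep] at hstab ⊢
    by_cases hbr : (if wn ≤ r ∧ (pvRef a wn m r).2.1.getD (r - wn) false = false
        then pvDec (pvRef a wn m r).1 (a.getD (r - wn) 0) else (pvRef a wn m r).1) (a.getD r 0) < m
    · rw [if_pos hbr] at hstab ⊢
      have hdel : pvDelF a wn m r = false := by rw [hstab]; exact hzero r le_rfl
      rw [ih (Nat.le_of_lt hrlt), hcount, hdel]
      simp
    · rw [if_neg hbr] at hstab ⊢
      have hdel : pvDelF a wn m r = true := by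
        rw [hstab]; exact pvGetD_set_self _ _ _ _ (by omega)
      rw [ih (Nat.le_of_lt hrlt), hcount, hdel]
      push_cast
      simp

-- positions of x among indices < t / ≥ t
def pvPosUpTo (a : List Int) (x : Int) (t : Nat) : List Nat :=
  (List.range t).filter (fun j => a.getD j 0 == x)
def pvPosFrom (a : List Int) (x : Int) (t : Nat) : List Nat :=
  (List.range' t (a.length - t)).filter (fun j => a.getD j 0 == x)

-- the kept list of B at time t with last eviction bound c
def pvKeptL (a : List Int) (wn : Nat) (m : Int) (x : Int) (t : Nat) (c : Int) : List Int :=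
  ((pvPosUpTo a x t).filter
    (fun q => !(pvDelF a wn m q) && decide (c < (q : Int)))).map (fun q : Nat => (q : Int))

-- filtering commutes with the Nat→Int cast map
theorem pvFilterMapCast (P : Int → Bool) :
    ∀ (l : List Nat), (l.map (fun q : Nat => (q : Int))).filter P
      = (l.filter (fun q : Nat => P (q : Int))).map (fun q : Nat => (q : Int)) := by
  intro l
  induction l with
  | nil => rfl
  | cons q rest ih =>
    by_cases h : P (q : Int) = true
    · rw [List.map_cons, List.filter_cons, if_pos h, List.filter_cons, if_pos h,
        List.map_cons, ih]
    · rw [List.map_cons, List.filter_cons, if_neg h, List.filter_cons, if_neg h, ih]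

-- eviction on a strictly increasing list is a filter
theorem pvEvictB_sorted (w p : Int) :
    ∀ (l : List Int), l.Pairwise (· < ·) →
    pvEvictB w p l = l.filter (fun q => decide (p - w < q)) := by
  intro l
  induction l with
  | nil => intro _; rfl
  | cons q rest ih =>
    intro hp
    rw [List.pairwise_cons] at hp
    by_cases hq : q ≤ p - w
    · simp only [pvEvictB, if_pos hq]
      rw [ih hp.2]
      have : decide (p - w < q) = false := by simp; omega
      simp [this]
    · simp only [pvEvictB, if_neg hq]
      have hall : ∀ b ∈ q :: rest, decide (p - w < b) = true := by
        intro b hb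
        rcases List.mem_cons.1 hb with h | h
        · subst h; simp; omega
        · have := hp.1 b h; simp; omega
      exact (List.filter_eq_self.2 hall).symm

theorem pvEvictB_all (w p : Int) :
    ∀ (l : List Int), (∀ q ∈ l, q ≤ p - w) → pvEvictB w p l = [] := by
  intro l
  induction l with
  | nil => intro _; rfl
  | cons q rest ih =>
    intro h
    simp only [pvEvictB, if_pos (h q (by simp))]
    exact ih (fun b hb => h b (by simp [hb]))

-- kept lists are strictly increasing
theorem pvKeptL_sorted (a : List Int) (wn : Nat) (m : Int) (x : Int) (t : Nat) (c : Int) :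
    (pvKeptL a wn m x t c).Pairwise (· < ·) := by
  unfold pvKeptL pvPosUpTo
  have h : (((List.range t).filter (fun j => a.getD j 0 == x)).filter
      (fun q => !(pvDelF a wn m q) && decide (c < (q : Int)))).Pairwise (· < ·) :=
    ((List.pairwise_lt_range).filter _).filter _
  exact List.Pairwise.map (fun q : Nat => (q : Int)) (fun p q hpq => by show ((p : Int) < (q : Int)); exact_mod_cast hpq) h

-- counting the kept window elements of value x through the final flags
theorem pvCount_window (a : List Int) (wn : Nat) (m : Int) (x : Int) (t : Nat)
    (hw : 1 ≤ wn) (hx : a.getD t 0 = x) :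
    ((pvPosUpTo a x t).countP
      (fun q => !(pvDelF a wn m q) && decide ((t : Int) - (wn : Int) < (q : Int))) : Int)
    = pvCntF a wn m t := by
  unfold pvCntF pvPosUpTo
  rw [List.countP_filter]
  set len := min (wn - 1) t with hlen
  have hs : (t + 1 - wn) + len = t := by omega
  have hr : List.range t = List.range' 0 (t + 1 - wn) ++ List.range' (t + 1 - wn) len := by
    have h := List.range'_append_1 (s := 0) (m := t + 1 - wn) (n := len)
    simp only [Nat.zero_add] at h
    conv_lhs => rw [List.range_eq_range', show t = (t + 1 - wn) + len from by omega]
    exact h.symm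
  rw [hr, List.countP_append]
  have h0 : (List.range' 0 (t + 1 - wn)).countP
      (fun a_1 => (!pvDelF a wn m a_1 && decide ((t:Int) - (wn:Int) < (a_1:Int))) && (a.getD a_1 0 == x)) = 0 := by
    rw [List.countP_eq_zero]
    intro j hj
    have hjm := List.mem_range'_1.1 hj
    have : ¬ ((t:Int) - (wn:Int) < (j:Int)) := by omega
    simp [this]
  rw [h0]
  have hcong : (List.range' (t + 1 - wn) len).countP
      (fun a_1 => (!pvDelF a wn m a_1 && decide ((t:Int) - (wn:Int) < (a_1:Int))) && (a.getD a_1 0 == x))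
      = (List.range' (t + 1 - wn) len).countP
      (fun j => a.getD j 0 == a.getD t 0 && !(pvDelF a wn m j)) := by
    refine List.countP_congr ?_
    intro j hj
    have hjm := List.mem_range'_1.1 hj
    have hb : decide ((t:Int) - (wn:Int) < (j:Int)) = true := by simp; omega
    rw [hx]
    simp only [hb, Bool.and_true]
    rw [Bool.and_comm]
  rw [hcong]
  push_cast
  ring

-- the per-value greedy of B computes the number of finally-discarded positions of its value
theorem pvB_run (a : List Int) (wn : Nat) (m : Int) (x : Int) (hw : 1 ≤ wn) :
    ∀ (fuel t : Nat) (c acc : Int), t + fuel = a.length → c ≤ (t : Int) - (wn : Int) →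
    (((pvPosFrom a x t).map (fun q : Nat => (q : Int))).foldl
      (fun (st : List Int × Int) p =>
        let kept := pvEvictB (wn : Int) p st.1
        if PySem.List.len kept < m then (kept ++ [p], st.2) else (kept, st.2 + 1))
      (pvKeptL a wn m x t c, acc)).2
    = acc + ((pvPosFrom a x t).countP (fun q => pvDelF a wn m q) : Int) := by
  intro fuel
  induction fuel with
  | zero =>
    intro t c acc ht _
    have : a.length - t = 0 := by omega
    simp [pvPosFrom, this]
  | succ fuel ih =>
    intro t c acc ht hc
    have hlt : t < a.length := by omega
    have hnt : a.length - t = fuel + 1 := by omega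
    have hnt1 : a.length - (t + 1) = fuel := by omega
    have hfrom : pvPosFrom a x t
        = if a.getD t 0 == x then t :: pvPosFrom a x (t + 1) else pvPosFrom a x (t + 1) := by
      unfold pvPosFrom
      rw [hnt, List.range'_succ, hnt1]
      by_cases h : (a.getD t 0 == x) = true
      · rw [if_pos h, List.filter_cons, if_pos h]
      · rw [if_neg h, List.filter_cons, if_neg h]
    by_cases hx : a.getD t 0 == x
    · have hxv : a.getD t 0 = x := by simpa using hx
      rw [hfrom, if_pos hx]
      simp only [List.map_cons, List.foldl_cons]
      -- the eviction step
      have hev : pvEvictB (wn : Int) (t : Int) (pvKeptL a wn m x t c)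
          = pvKeptL a wn m x t ((t : Int) - (wn : Int)) := by
        rw [pvEvictB_sorted _ _ _ (pvKeptL_sorted a wn m x t c)]
        unfold pvKeptL
        rw [pvFilterMapCast]
        congr 1
        rw [List.filter_filter]
        refine List.filter_congr ?_
        intro q _
        by_cases hd : pvDelF a wn m q
        · simp [hd]
        · by_cases hq : (t : Int) - (wn : Int) < (q : Int)
          · have hcq : c < (q : Int) := by omega
            simp [hd, hq, hcq]
          · simp [hd, hq]
      rw [hev]
      -- its length is the window count
      have hlenk : PySem.List.len (pvKeptL a wn m x t ((t : Int) - (wn : Int)))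
          = pvCntF a wn m t := by
        rw [PySem.List.len_eq]
        unfold pvKeptL
        rw [List.length_map, ← List.countP_eq_length_filter]
        exact pvCount_window a wn m x t hw hxv
      rw [hlenk]
      have hchar := pvDelChar a wn m hw t hlt
      by_cases hbr : pvCntF a wn m t < m
      · rw [if_pos hbr]
        have hdel : pvDelF a wn m t = false := by rw [hchar]; simp [hbr]
        -- appended element extends the kept list
        have happ : pvKeptL a wn m x t ((t : Int) - (wn : Int)) ++ [(t : Int)]
            = pvKeptL a wn m x (t + 1) ((t : Int) - (wn : Int)) := by
          unfold pvKeptL pvPosUpTo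
          rw [List.range_succ, List.filter_append, List.filter_append]
          have h1 : (List.filter (fun j => a.getD j 0 == x) [t]) = [t] := by
            rw [List.filter_cons, if_pos hx]
            rfl
          rw [h1]
          have h2 : List.filter (fun q => !pvDelF a wn m q && decide ((t:Int) - (wn:Int) < (q:Int))) [t] = [t] := by
            have hcond : (!pvDelF a wn m t && decide ((t:Int) - (wn:Int) < (t:Int))) = true := by
              rw [hdel]
              simp
              omega
            rw [List.filter_cons, if_pos hcond]
            rfl
          rw [h2, List.map_append]
          rfl
        rw [happ]
        rw [ih (t + 1) ((t : Int) - (wn : Int)) acc (by omega) (by push_cast; omega)]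
        have : (pvPosFrom a x (t + 1)).countP (fun q => pvDelF a wn m q)
            = (t :: pvPosFrom a x (t + 1)).countP (fun q => pvDelF a wn m q) := by
          simp [List.countP_cons, hdel]
        rw [this]
      · rw [if_neg hbr]
        have hdel : pvDelF a wn m t = true := by rw [hchar]; simp [hbr]
        have happ : pvKeptL a wn m x t ((t : Int) - (wn : Int))
            = pvKeptL a wn m x (t + 1) ((t : Int) - (wn : Int)) := by
          unfold pvKeptL pvPosUpTo
          rw [List.range_succ, List.filter_append, List.filter_append]
          have h1 : (List.filter (fun j => a.getD j 0 == x) [t]) = [t] := by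
            rw [List.filter_cons, if_pos hx]
            rfl
          rw [h1]
          have h2 : List.filter (fun q => !pvDelF a wn m q && decide ((t:Int) - (wn:Int) < (q:Int))) [t] = [] := by
            rw [List.filter_cons, if_neg (by rw [hdel]; simp)]
            rfl
          rw [h2]
          simp
        rw [happ]
        rw [ih (t + 1) ((t : Int) - (wn : Int)) (acc + 1) (by omega) (by push_cast; omega)]
        have : ((t :: pvPosFrom a x (t + 1)).countP (fun q => pvDelF a wn m q) : Int)
            = 1 + ((pvPosFrom a x (t + 1)).countP (fun q => pvDelF a wn m q) : Int) := by
          simp [List.countP_cons, hdel]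
          push_cast
          ring
        rw [this]
        ring
    · rw [hfrom, if_neg hx]
      have hup : pvPosUpTo a x (t + 1) = pvPosUpTo a x t := by
        unfold pvPosUpTo
        rw [List.range_succ, List.filter_append]
        have : (List.filter (fun j => a.getD j 0 == x) [t]) = [] := by
          rw [List.filter_cons, if_neg hx]
          rfl
        rw [this]
        simp
      have hkept : pvKeptL a wn m x t c = pvKeptL a wn m x (t + 1) c := by
        unfold pvKeptL; rw [hup]
      rw [hkept]
      exact ih (t + 1) c acc (by omega) (by omega)

-- ===== the grouping dict =====

-- the swapped enumerate pairs of value x project to the (cast) positions of x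
theorem pvEnumFilter (a : List Int) (x : Int) :
    ∀ (l : List Nat),
    (((((l.map (fun k : Nat => (k : Int))).map (fun j => (j, PySem.List.pyGetD a j 0))).map
        (fun p => (p.2, p.1))).filter (fun p => p.1 == x)).map (fun p => p.2))
    = (l.filter (fun j => a.getD j 0 == x)).map (fun q : Nat => (q : Int)) := by
  intro l
  induction l with
  | nil => rfl
  | cons j rest ih =>
    simp only [List.map_cons]
    have hg : PySem.List.pyGetD a (j : Int) 0 = a.getD j 0 := PySem.List.pyGetD_natCast a j 0
    by_cases h : (a.getD j 0 == x) = true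
    · have h' : ((PySem.List.pyGetD a (j : Int) 0, (j : Int)).1 == x) = true := by
        rw [show (PySem.List.pyGetD a (j : Int) 0, (j : Int)).1 = PySem.List.pyGetD a (j : Int) 0 from rfl, hg]
        exact h
      rw [List.filter_cons, if_pos h', List.map_cons, ih, List.filter_cons, if_pos h, List.map_cons]
    · have h' : ¬ ((PySem.List.pyGetD a (j : Int) 0, (j : Int)).1 == x) = true := by
        rw [show (PySem.List.pyGetD a (j : Int) 0, (j : Int)).1 = PySem.List.pyGetD a (j : Int) 0 from rfl, hg]
        exact h
      rw [List.filter_cons, if_neg h', ih, List.filter_cons, if_neg h]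

-- the bucket of x is exactly the (cast) list of positions of x
theorem pvGroup_getD (a : List Int) (x : Int) :
    (((PySem.List.enumerate a).foldl
      (fun (d : PySem.Dict Int (List Int)) p => d.modify p.2 [] (fun v => v ++ [p.1]))
      PySem.Dict.empty)).getD x []
    = (pvPosUpTo a x a.length).map (fun q : Nat => (q : Int)) := by
  have hfold : (PySem.List.enumerate a).foldl
      (fun (d : PySem.Dict Int (List Int)) p => d.modify p.2 [] (fun v => v ++ [p.1]))
      PySem.Dict.empty
      = ((PySem.List.enumerate a).map (fun p => (p.2, p.1))).foldl
      (fun (d : PySem.Dict Int (List Int)) p => d.modify p.1 [] (fun v => v ++ [p.2]))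
      PySem.Dict.empty := by
    rw [List.foldl_map]
  rw [hfold, PySem.Dict.getD_foldl_modify_append]
  rw [PySem.Dict.getD_empty]
  rw [List.nil_append]
  -- identify the filtered enumerate with the positions of x
  rw [PySem.List.enumerate_eq_map_pyRange (d := 0), PySem.List.len_eq,
    PySem.List.pyRange_zero_natCast, pvEnumFilter]
  rfl

-- the keys of the grouping dict
theorem pvGroup_keys (a : List Int) :
    (((PySem.List.enumerate a).foldl
      (fun (d : PySem.Dict Int (List Int)) p => d.modify p.2 [] (fun v => v ++ [p.1]))
      PySem.Dict.empty)).keys = PySem.Set.ofList a := by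
  have h := PySem.Dict.keys_foldl_modify_key (PySem.List.enumerate a) (fun p => p.2)
    ([] : List Int) (fun _ p => (fun v => v ++ [p.1])) PySem.Dict.empty
  rw [PySem.List.map_snd_enumerate, PySem.Dict.keys_empty, PySem.Set.update_nil_left] at h
  exact h

theorem pvGroup_nodup (a : List Int) :
    (((PySem.List.enumerate a).foldl
      (fun (d : PySem.Dict Int (List Int)) p => d.modify p.2 [] (fun v => v ++ [p.1]))
      PySem.Dict.empty)).keys.Nodup := by
  rw [pvGroup_keys]
  exact PySem.Set.nodup_ofList a

-- splitting a count over disjoint value classes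
theorem pvCountP_split_filter (P q : Nat → Bool) :
    ∀ (l : List Nat), l.countP P = (l.filter q).countP P + (l.filter (fun j => !q j)).countP P := by
  intro l
  induction l with
  | nil => rfl
  | cons j rest ih =>
    by_cases hq : q j
    · rw [List.filter_cons_of_pos hq, List.filter_cons_of_neg (by simp [hq])]
      simp only [List.countP_cons, ih]
      split <;> omega
    · rw [List.filter_cons_of_neg (by simpa using hq), List.filter_cons_of_pos (by simpa using hq)]
      simp only [List.countP_cons, ih]
      split <;> omega

theorem pvSplit (g : Nat → Int) (P : Nat → Bool) :
    ∀ (ks : List Int) (l : List Nat), ks.Nodup → (∀ j ∈ l, g j ∈ ks) →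
    ((ks.map (fun x => ((l.filter (fun j => g j == x)).countP P : Int))).sum)
    = (l.countP P : Int) := by
  intro ks
  induction ks with
  | nil =>
    intro l _ h
    have : l = [] := by
      cases l with
      | nil => rfl
      | cons j rest => exact absurd (h j (by simp)) (by simp)
    simp [this]
  | cons x ks' ih =>
    intro l hnd h
    rw [List.nodup_cons] at hnd
    rw [List.map_cons, List.sum_cons]
    have hmap : ks'.map (fun y => ((l.filter (fun j => g j == y)).countP P : Int))
        = ks'.map (fun y => (((l.filter (fun j => !(g j == x))).filter (fun j => g j == y)).countP P : Int)) := by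
      refine List.map_congr_left ?_
      intro y hy
      have hyx : y ≠ x := fun hh => hnd.1 (hh ▸ hy)
      have hfil : l.filter (fun j => g j == y)
          = (l.filter (fun j => !(g j == x))).filter (fun j => g j == y) := by
        rw [List.filter_filter]
        refine List.filter_congr ?_
        intro j _
        by_cases hj : (g j == y) = true
        · have hgy : g j = y := by simpa using hj
          have hgx : (g j == x) = false := by
            refine beq_eq_false_iff_ne.mpr ?_
            rw [hgy]
            exact hyx
          rw [hj, hgx]
          rfl
        · have hj' : (g j == y) = false := by simpa using hj
          rw [hj']
          rfl
      rw [hfil]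
    rw [hmap]
    rw [ih (l.filter (fun j => !(g j == x))) hnd.2 ?side]
    case side =>
      intro j hj
      rw [List.mem_filter] at hj
      have := h j hj.1
      rcases List.mem_cons.1 this with hh | hh
      · exfalso
        have h2 : (!(g j == x)) = true := hj.2
        rw [hh] at h2
        simp at h2
      · exact hh
    have := pvCountP_split_filter P (fun j => g j == x) l
    omega

-- the outer fold over the dict values, given the inner per-bucket results
theorem pvAlt_sum (a : List Int) (w m : Int) (F : Int → Int)
    (h : ∀ (x : Int) (ans : Int),
      (((pvPosUpTo a x a.length).map (fun q : Nat => (q : Int))).foldl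
        (fun (st : List Int × Int) p =>
          let kept := pvEvictB w p st.1
          if PySem.List.len kept < m then (kept ++ [p], st.2) else (kept, st.2 + 1))
        ([], ans)).2 = ans + F x) :
    minArrivalsToDiscard_alt a w m = ((PySem.Set.ofList a).map F).sum := by
  unfold minArrivalsToDiscard_alt
  set d := (PySem.List.enumerate a).foldl
      (fun (d : PySem.Dict Int (List Int)) p => d.modify p.2 [] (fun v => v ++ [p.1]))
      PySem.Dict.empty with hd
  have hvals : d.values = d.items.map (fun p => p.2) := rfl
  have hitems : ∀ p ∈ d.items, p.2 = (pvPosUpTo a p.1 a.length).map (fun q : Nat => (q : Int)) := by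
    intro p hp
    have := PySem.Dict.getD_of_mem_items (d := d) (k := p.1) (v := p.2) (d0 := [])
      (by exact hp) (pvGroup_nodup a)
    rw [← this, pvGroup_getD]
  -- replace each bucket's fold result by ans + F key
  have hstep : d.values.foldl
      (fun ans ps =>
        (ps.foldl
          (fun (st : List Int × Int) p =>
            let kept := pvEvictB w p st.1
            if PySem.List.len kept < m then (kept ++ [p], st.2) else (kept, st.2 + 1))
          ([], ans)).2) 0
      = d.items.foldl (fun ans p => ans + F p.1) 0 := by
    rw [hvals, List.foldl_map]
    refine PySem.List.foldl_congr_mem _ _ _ _ ?_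
    intro ans p hp
    rw [hitems p hp]
    exact h p.1 ans
  rw [hstep]
  have hadd := PySem.List.foldl_add d.items (fun p : Int × List Int => F p.1) 0
  rw [hadd]
  rw [show d.items.map (fun p => F p.1) = d.keys.map F from by
    have : d.keys = d.items.map (fun p => p.1) := rfl
    rw [this, List.map_map]; rfl]
  rw [pvGroup_keys]
  ring

-- B for window size wn ≥ 1 counts the final flags
theorem pvB_main (a : List Int) (wn : Nat) (m : Int) (hw : 1 ≤ wn) :
    minArrivalsToDiscard_alt a (wn : Int) m
    = ((List.range a.length).countP (fun j => pvDelF a wn m j) : Int) := by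
  rw [pvAlt_sum a (wn : Int) m
    (fun x => ((pvPosFrom a x 0).countP (fun q => pvDelF a wn m q) : Int)) ?inner]
  case inner =>
    intro x ans
    have h0 : pvPosUpTo a x a.length = pvPosFrom a x 0 := by
      unfold pvPosUpTo pvPosFrom
      rw [Nat.sub_zero, ← List.range_eq_range']
    have hk : pvKeptL a wn m x 0 (-(wn : Int)) = [] := by
      unfold pvKeptL pvPosUpTo
      simp
    have := pvB_run a wn m x hw a.length 0 (-(wn : Int)) ans (by omega) (by push_cast; omega)
    rw [hk] at this
    rw [h0]
    exact this
  -- sum over the distinct values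
  have hsplit := pvSplit (fun j => a.getD j 0) (fun j => pvDelF a wn m j)
    (PySem.Set.ofList a) (List.range a.length) (PySem.Set.nodup_ofList a) ?mem
  case mem =>
    intro j hj
    have hjl : j < a.length := List.mem_range.1 hj
    rw [PySem.Set.mem_ofList]
    show a.getD j 0 ∈ a
    have h' : a.getD j 0 = a[j] := by simp [List.getD, List.getElem?_eq_getElem hjl]
    rw [h']
    exact List.getElem_mem hjl
  rw [← hsplit]
  congr 1
  refine List.map_congr_left ?_
  intro x _
  congr 1
  unfold pvPosFrom
  rw [Nat.sub_zero, ← List.range_eq_range']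

-- ===== the degenerate window sizes w ≤ 0 =====

-- B, w ≤ 0: every kept element is evicted before the next decision
theorem pvBneg_run (w m : Int) (hw : w ≤ 0) :
    ∀ (ps : List Int) (kept : List Int) (ans : Int),
    (∀ q ∈ kept, ∀ p ∈ ps, q < p) → ps.Pairwise (· < ·) →
    (ps.foldl
      (fun (st : List Int × Int) p =>
        let kept := pvEvictB w p st.1
        if PySem.List.len kept < m then (kept ++ [p], st.2) else (kept, st.2 + 1))
      (kept, ans)).2
    = ans + (if 0 < m then 0 else (ps.length : Int)) := by
  intro ps
  induction ps with
  | nil =>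
    intro kept ans _ _
    by_cases hm : 0 < m <;> simp [hm]
  | cons p rest ih =>
    intro kept ans hlt hp
    rw [List.pairwise_cons] at hp
    simp only [List.foldl_cons]
    have hev : pvEvictB w p kept = [] := by
      refine pvEvictB_all w p kept ?_
      intro q hq
      have := hlt q hq p (by simp)
      omega
    rw [hev]
    have hlen0 : PySem.List.len ([] : List Int) = 0 := by rw [PySem.List.len_eq]; rfl
    by_cases hm : 0 < m
    · rw [if_pos (by rw [hlen0]; exact hm)]
      rw [List.nil_append]
      rw [ih [p] ans (by intro q hq p' hp'; simp at hq; subst hq; exact hp.1 p' hp') hp.2]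
      simp [hm]
    · rw [if_neg (by rw [hlen0]; exact hm)]
      rw [ih [] (ans + 1) (by intro q hq; simp at hq) hp.2]
      simp only [hm, if_false, List.length_cons]
      push_cast
      ring

-- B for w ≤ 0
theorem pvBneg (a : List Int) (w m : Int) (hw : w ≤ 0) :
    minArrivalsToDiscard_alt a w m = if 0 < m then 0 else (a.length : Int) := by
  rw [pvAlt_sum a w m
    (fun x => if 0 < m then 0 else ((pvPosUpTo a x a.length).length : Int)) ?inner]
  case inner =>
    intro x ans
    have hsort : ((pvPosUpTo a x a.length).map (fun q : Nat => (q : Int))).Pairwise (· < ·) := by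
      unfold pvPosUpTo
      refine List.Pairwise.map _ (fun p q h => by exact_mod_cast h) ?_
      exact (List.pairwise_lt_range).filter _
    rw [pvBneg_run w m hw _ [] ans (by intro q hq; simp at hq) hsort]
    rw [List.length_map]
  by_cases hm : 0 < m
  · simp only [hm, if_true]
    have hz : ∀ (ks : List Int), (ks.map (fun _ => (0 : Int))).sum = 0 := by
      intro ks
      induction ks with
      | nil => rfl
      | cons k rest ih => simp [ih]
    rw [hz]
  · simp only [hm, if_false]
    have hsplit := pvSplit (fun j => a.getD j 0) (fun _ => true)
      (PySem.Set.ofList a) (List.range a.length) (PySem.Set.nodup_ofList a) ?mem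
    case mem =>
      intro j hj
      have hjl : j < a.length := List.mem_range.1 hj
      rw [PySem.Set.mem_ofList]
      show a.getD j 0 ∈ a
      have h' : a.getD j 0 = a[j] := by simp [List.getD, List.getElem?_eq_getElem hjl]
      rw [h']
      exact List.getElem_mem hjl
    have hl : ∀ x, (pvPosUpTo a x a.length).length
        = ((List.range a.length).filter (fun j => a.getD j 0 == x)).countP (fun _ => true) := by
      intro x
      unfold pvPosUpTo
      rw [List.countP_true]
    calc ((PySem.Set.ofList a).map fun x => ((pvPosUpTo a x a.length).length : Int)).sum
        = ((PySem.Set.ofList a).map fun x =>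
            ((((List.range a.length).filter (fun j => a.getD j 0 == x)).countP (fun _ => true) : Nat) : Int)).sum := by
          congr 1
          refine List.map_congr_left ?_
          intro x _
          rw [hl x]
      _ = (((List.range a.length).countP (fun _ => true) : Nat) : Int) := hsplit
      _ = (a.length : Int) := by rw [List.countP_true]; simp

-- A, m ≤ 0 and w ≤ 0: every element is discarded
theorem pvAneg_mle (a : List Int) (w m n : Int) (hm : m ≤ 0) (hw : w ≤ 0) :
    ∀ (fuel : Nat) (r ans : Int) (del : List Bool), r + (fuel : Int) = n →
    pvLoopA a w m n (fun _ => 0) r r ans del fuel = ans + (fuel : Int) := by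
  intro fuel
  induction fuel with
  | zero => intro r ans del _; simp [pvLoopA]
  | succ fuel ih =>
    intro r ans del hlink
    simp only [pvLoopA]
    rw [if_pos (show r < n from by push_cast at hlink; omega)]
    rw [if_pos (show r - r + 1 > w from by omega)]
    rw [if_neg (show ¬ ((fun _ : Int => (0 : Int)) (PySem.List.pyGetD a r 0) > 0 ∧
        PySem.List.pyGetD del r false = false) from fun h => absurd h.1 (lt_irrefl 0))]
    rw [if_neg (show ¬ (r - (r + 1) + 1 ≤ w ∧
        (fun _ : Int => (0 : Int)) (PySem.List.pyGetD a r 0) < m) from fun h => by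
      have := h.2
      simp only [] at this
      omega)]
    rw [if_pos (show (fun _ : Int => (0 : Int)) (PySem.List.pyGetD a r 0) ≥ m from by
      simp only []
      omega)]
    rw [ih (r + 1) (ans + 1) (PySem.List.pySetD del r true) (by push_cast at hlink ⊢; omega)]
    push_cast
    ring

-- A, 0 < m and w < 0: nothing is ever counted or discarded
theorem pvAneg_mpos (a : List Int) (w m n : Int) (hm : 0 < m) (hw : w < 0) :
    ∀ (fuel : Nat) (r ans : Int) (del : List Bool),
    pvLoopA a w m n (fun _ => 0) r r ans del fuel = ans := by
  intro fuel
  induction fuel with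
  | zero => intro r ans del; rfl
  | succ fuel ih =>
    intro r ans del
    simp only [pvLoopA]
    by_cases hr : r < n
    · rw [if_pos hr]
      rw [if_pos (show r - r + 1 > w from by omega)]
      rw [if_neg (show ¬ ((fun _ : Int => (0 : Int)) (PySem.List.pyGetD a r 0) > 0 ∧
          PySem.List.pyGetD del r false = false) from fun h => absurd h.1 (lt_irrefl 0))]
      rw [if_neg (show ¬ (r - (r + 1) + 1 ≤ w ∧
          (fun _ : Int => (0 : Int)) (PySem.List.pyGetD a r 0) < m) from fun h => absurd h.1 (by omega))]
      rw [if_neg (show ¬ ((fun _ : Int => (0 : Int)) (PySem.List.pyGetD a r 0) ≥ m) from by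
        simp only []
        omega)]
      exact ih (r + 1) ans del
    · rw [if_neg hr]

-- the counter A maintains at w = 0, 0 < m: 1 on the values seen so far, 0 elsewhere
def pvChi (a : List Int) (r : Nat) : Int → Int :=
  fun v => if (a.take r).contains v then 1 else 0

-- A, 0 < m and w = 0: the current value is evicted by value before each decision, nothing is discarded
theorem pvAzero_mpos (a : List Int) (m : Int) (hm : 0 < m) :
    ∀ (fuel : Nat) (r : Nat) (ans : Int),
    pvLoopA a 0 m (a.length : Int) (pvChi a r) (r : Int) (r : Int) ans
      (List.replicate a.length false) fuel = ans := by
  intro fuel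
  induction fuel with
  | zero => intro r ans; rfl
  | succ fuel ih =>
    intro r ans
    simp only [pvLoopA]
    by_cases hr : (r : Int) < (a.length : Int)
    · rw [if_pos hr]
      have hrlen : r < a.length := by omega
      rw [if_pos (show (r : Int) - (r : Int) + 1 > 0 from by omega)]
      simp only [PySem.List.pyGetD_natCast]
      have hdel : (List.replicate a.length false).getD r false = false :=
        pvGetD_replicate_false _ _
      have htake : a.take (r + 1) = a.take r ++ [a.getD r 0] := by
        rw [List.take_add_one]
        have h1 : a[r]? = some (a.getD r 0) := by
          rw [List.getElem?_eq_getElem hrlen]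
          simp [List.getD, List.getElem?_eq_getElem hrlen]
        rw [h1]
        rfl
      have hcast : (r : Int) + 1 = ((r + 1 : Nat) : Int) := by push_cast; ring
      by_cases hc : (a.take r).contains (a.getD r 0)
      · have hc' : a[r]?.getD 0 ∈ List.take r a := by simpa using hc
        rw [if_pos (show pvChi a r (a.getD r 0) > 0 ∧
            (List.replicate a.length false).getD r false = false from
            ⟨by simp [pvChi, hc'], hdel⟩)]
        rw [if_pos (show (r : Int) - ((r : Int) + 1) + 1 ≤ 0 ∧
            pvDec (pvChi a r) (a.getD r 0) (a.getD r 0) < m from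
            ⟨by omega, by simp [pvDec, pvChi, hc']; omega⟩)]
        have hstep : pvInc (pvDec (pvChi a r) (a.getD r 0)) (a.getD r 0) = pvChi a (r + 1) := by
          funext v
          by_cases hv : v = a.getD r 0
          · simp [pvInc, pvDec, pvChi, hv, htake, hc']
          · have hv2 : ¬ v = a[r]?.getD 0 := hv
            simp [pvInc, pvDec, pvChi, htake, hv2]
        rw [hstep, hcast]
        exact ih (r + 1) ans
      · have hc' : a[r]?.getD 0 ∉ List.take r a := by simpa using hc
        rw [if_neg (show ¬ (pvChi a r (a.getD r 0) > 0 ∧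
            (List.replicate a.length false).getD r false = false) from
            fun h => absurd h.1 (by simp [pvChi, hc']))]
        rw [if_pos (show (r : Int) - ((r : Int) + 1) + 1 ≤ 0 ∧
            pvChi a r (a.getD r 0) < m from ⟨by omega, by simp [pvChi, hc']; omega⟩)]
        have hstep : pvInc (pvChi a r) (a.getD r 0) = pvChi a (r + 1) := by
          funext v
          by_cases hv : v = a.getD r 0
          · simp [pvInc, pvChi, hv, htake, hc']
          · have hv2 : ¬ v = a[r]?.getD 0 := hv
            simp [pvInc, pvChi, htake, hv2]
        rw [hstep, hcast]
        exact ih (r + 1) ans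
    · rw [if_neg hr]

theorem pvRange_nonpos (w : Int) (hw : w ≤ 0) : PySem.List.pyRange 0 w 1 = [] := by
  rw [PySem.List.pyRange_one]
  have h0 : (w - 0).toNat = 0 := by omega
  simp [hw]

-- ===== VERDICT (by name: the statement is the Claim_ definition above) =====
theorem minArrivalsToDiscard_spec : Claim_equal_minArrivalsToDiscard := by
  intro a w m _ hpre
  unfold Pre_minArrivalsToDiscard at hpre
  unfold Spec_minArrivalsToDiscard
  by_cases hw1 : 1 ≤ w
  · set wn := w.toNat with hwn'
    have hcast : (wn : Int) = w := by omega
    have hw : 1 ≤ wn := by omega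
    have hn : wn ≤ a.length := by omega
    rw [← hcast]
    rw [pvB_main a wn m hw]
    rw [← pvAnsChar a wn m hw a.length le_rfl]
    show minArrivalsToDiscard a (wn : Int) m = _
    unfold minArrivalsToDiscard
    rw [pvPhase1 a wn m hw hn]
    show pvLoopA a (wn : Int) m (a.length : Int) (pvRef a wn m wn).1 0 (wn : Int)
        (pvRef a wn m wn).2.2 (pvRef a wn m wn).2.1 (((a.length : Int) - (wn : Int)).toNat) = _
    have h0 : (0 : Int) = (wn : Int) - (wn : Int) := by ring
    have hf : ((a.length : Int) - (wn : Int)).toNat = a.length - wn := by omega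
    rw [h0, hf]
    exact pvPhase2 a wn m hw (a.length - wn) wn (le_refl _) (by omega)
  · have hw0 : w ≤ 0 := by omega
    rw [pvBneg a w m hw0]
    unfold minArrivalsToDiscard
    rw [pvRange_nonpos w hw0]
    show pvLoopA a w m (a.length : Int) (fun _ => 0) 0 0 0
        (List.replicate a.length false) (((a.length : Int) - 0).toNat) = _
    by_cases hm : 0 < m
    · rcases lt_or_eq_of_le hw0 with hlt | heq
      · rw [pvAneg_mpos a w m (a.length : Int) hm hlt]
        simp [hm]
      · subst heq
        have hchi : pvChi a 0 = (fun _ => (0 : Int)) := by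
          funext v
          simp [pvChi]
        rw [← hchi]
        show pvLoopA a 0 m (a.length : Int) (pvChi a 0) ((0 : Nat) : Int) ((0 : Nat) : Int) 0
          (List.replicate a.length false) (((a.length : Int) - 0).toNat) = _
        rw [pvAzero_mpos a m hm]
        simp [hm]
    · rw [pvAneg_mle a w m (a.length : Int) (by omega) hw0 (((a.length : Int) - 0).toNat) 0 0
        (List.replicate a.length false) (by omega)]
      have hcn : ((((a.length : Int) - 0).toNat : Nat) : Int) = (a.length : Int) := by omega
      rw [hcn]
      simp [hm]
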